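-- pv_equiv track=rewrite | github.com/miliar/Code_Jam_Webscraper | solutions_python/Problem_200/4275.py | getLastTinyNumb
-- ===== SOURCE A (Python) =====
-- def intToList(num):
--     return [int(c) for c in str(num)]
--
-- def isTiny(num):
--     lNb = intToList(num)
--     for j in range(0, len(lNb[:-1])):
--         if lNb[j] <= lNb[j+1]:
--             continue
--         else:
--             return False
--     return True
--
-- def getLastTinyNumb(maxNum):
--     currentNb = -1
--
--     # One digit
--     if maxNum < 10:
--         return maxNum
--     else:
--         for i in range(1, maxNum+1):
--             if isTiny(i):
--                 currentNb = i
--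
--     print ("TinyNum: "+str(currentNb))
--
--     return currentNb;
-- ===== SOURCE B (Python) =====
-- def _isNonDecreasing(n):
--     s = str(n)
--     return all(a <= b for a, b in zip(s, s[1:]))
--
-- def getLastTinyNumb(maxNum):
--     if maxNum < 10:
--         return maxNum
--     n = maxNum
--     while not _isNonDecreasing(n):
--         n -= 1
--     return n
-- ===== Notes on version B (the rewrite author's own statement) =====
-- stated objective: faster
-- what changed: B searches downward from maxNum and returns the first number with non-decreasing digits (checked via a zip of adjacent string characters), instead of A's upward scan over all of 1..maxNum keeping the last hit.
import Mathlib
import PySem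

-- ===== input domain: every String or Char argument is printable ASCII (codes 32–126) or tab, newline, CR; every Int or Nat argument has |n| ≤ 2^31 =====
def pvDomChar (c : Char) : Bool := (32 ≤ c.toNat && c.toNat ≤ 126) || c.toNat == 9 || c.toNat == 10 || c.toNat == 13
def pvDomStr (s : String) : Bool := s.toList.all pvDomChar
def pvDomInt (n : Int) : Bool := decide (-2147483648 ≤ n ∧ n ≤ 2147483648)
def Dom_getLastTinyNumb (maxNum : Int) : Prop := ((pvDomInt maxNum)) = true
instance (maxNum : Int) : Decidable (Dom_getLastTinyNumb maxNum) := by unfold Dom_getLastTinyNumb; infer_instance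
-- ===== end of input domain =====

-- B replaces A's upward scan over all of 1..maxNum (keeping the last non-decreasing number)
-- by a downward search from maxNum returning the first one; return values proved equal
-- (A's print to stdout is a side effect outside the claim).

-- ===== PORT A =====
-- int(c); equals int(c) for the decimal digit characters str produces here
-- (isTiny is only applied to the positive numbers 1..maxNum, so no '-' occurs).
def intToList (num : Int) : List Int :=
  (PySem.Int.toChars num).map (fun c => (c.toNat : Int) - 48)

-- the 'for j in range(...)' loop of isTiny with its early 'return False'
def isTinyGo (lNb : List Int) : List Int → Bool
  | [] => true
  | j :: js =>
      if PySem.List.pyGetD lNb j 0 ≤ PySem.List.pyGetD lNb (j + 1) 0 then isTinyGo lNb js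
      else false

def isTiny (num : Int) : Bool :=
  let lNb := intToList num
  isTinyGo lNb (PySem.List.pyRange 0 (PySem.List.len (PySem.List.slice lNb none (some (-1)))) 1)

def getLastTinyNumb (maxNum : Int) : Int :=
  let currentNb : Int := -1
  if maxNum < 10 then maxNum
  else (PySem.List.pyRange 1 (maxNum + 1) 1).foldl
         (fun currentNb i => if isTiny i then i else currentNb) currentNb

-- ===== PORT B =====
def isNonDecreasing (n : Int) : Bool :=
  let s := PySem.Int.toChars n
  (s.zip (s.drop 1)).all (fun p => p.1 ≤ p.2)

-- the 'while not _isNonDecreasing(n): n -= 1' loop; fuel (maxNum - 9).toNat suffices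
-- since every one-digit number is non-decreasing
def countDown : Nat → Int → Int
  | 0, n => n
  | fuel + 1, n => if isNonDecreasing n then n else countDown fuel (n - 1)

def getLastTinyNumb_alt (maxNum : Int) : Int :=
  if maxNum < 10 then maxNum else countDown (maxNum - 9).toNat maxNum

-- ===== PRECONDITION & SPEC =====
def Spec_getLastTinyNumb (maxNum : Int) (out : Int) : Prop := out = getLastTinyNumb_alt maxNum
instance (maxNum : Int) (out : Int) : Decidable (Spec_getLastTinyNumb maxNum out) := by unfold Spec_getLastTinyNumb; infer_instance

-- ===== CLAIM (what is proved, stated in full; the proofs are below) =====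
def Claim_equal_getLastTinyNumb : Prop := ∀ (maxNum : Int), Dom_getLastTinyNumb maxNum → Spec_getLastTinyNumb maxNum (getLastTinyNumb maxNum)

-- ===== LEMMAS AND PROOFS =====

-- the adjacent-pair check both tiny tests compute, on any list
def adjLE {α : Type} [LE α] [DecidableLE α] : List α → Bool
  | [] => true
  | [_] => true
  | a :: b :: rest => decide (a ≤ b) && adjLE (b :: rest)

lemma isTinyGo_range (l : List Int) (a : Nat) :
    isTinyGo l (PySem.List.pyRange (a : Int) ((l.length : Int) - 1) 1) = adjLE (l.drop a) := by
  by_cases h : (a : Int) < (l.length : Int) - 1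
  · rw [PySem.List.pyRange_one_cons h]
    have hcast : ((a : Int) + 1) = ((a + 1 : Nat) : Int) := by push_cast; ring
    rw [isTinyGo, hcast, isTinyGo_range l (a + 1)]
    rw [PySem.List.pyGetD_natCast, PySem.List.pyGetD_natCast]
    have hda : l.drop a = l[a] :: l.drop (a + 1) :=
      List.drop_eq_getElem_cons (by omega)
    have hda1 : l.drop (a + 1) = l[a + 1] :: l.drop (a + 2) :=
      List.drop_eq_getElem_cons (by omega)
    rw [hda, hda1, adjLE]
    simp [List.getD_eq_getElem?_getD, List.getElem?_eq_getElem (by omega : a < l.length),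
      List.getElem?_eq_getElem (by omega : a + 1 < l.length), ← hda1]
  · rw [PySem.List.pyRange_one_eq_nil (by omega), isTinyGo]
    rcases Nat.lt_or_ge a l.length with hlt | hge
    · have ha : a = l.length - 1 := by omega
      subst ha
      have hd : l.drop (l.length - 1) = [l.getLast (by intro hnil; simp [hnil] at hlt)] :=
        List.drop_length_sub_one _
      rw [hd, adjLE]
    · rw [List.drop_of_length_le hge, adjLE]
termination_by l.length - a

lemma isTiny_eq_adjLE (num : Int) : isTiny num = adjLE (intToList num) := by
  show isTinyGo _ _ = _
  rw [PySem.List.slice_to_neg_one, PySem.List.len_eq, List.length_dropLast]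
  rcases hl : intToList num with _ | ⟨x, t⟩
  · rfl
  · have h2 : (((x :: t).length - 1 : Nat) : Int) = (((x :: t).length : Int)) - 1 := by
      simp
    rw [h2]
    simpa using isTinyGo_range (x :: t) 0

lemma adjLE_zip {α : Type} [LE α] [DecidableLE α] (l : List α) :
    (l.zip (l.drop 1)).all (fun p => decide (p.1 ≤ p.2)) = adjLE l := by
  match l with
  | [] => rfl
  | [_] => rfl
  | a :: b :: rest =>
      rw [adjLE]
      have hz : ((a :: b :: rest).zip ((a :: b :: rest).drop 1))
           = (a, b) :: ((b :: rest).zip ((b :: rest).drop 1)) := by simp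
      rw [hz, List.all_cons, adjLE_zip (b :: rest)]

lemma adjLE_map_digit (cs : List Char) :
    adjLE (cs.map (fun c => (c.toNat : Int) - 48)) = adjLE cs := by
  match cs with
  | [] => rfl
  | [_] => rfl
  | a :: b :: rest =>
      have ih := adjLE_map_digit (b :: rest)
      simp only [List.map_cons] at ih ⊢
      rw [adjLE, adjLE, ih]
      have hc : (a ≤ b) ↔ (a.toNat ≤ b.toNat) := Iff.rfl
      have : ((a.toNat : Int) - 48 ≤ (b.toNat : Int) - 48) ↔ a ≤ b := by
        rw [hc]; omega
      simp [this]

lemma tiny_agree (num : Int) : isTiny num = isNonDecreasing num := by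
  rw [isTiny_eq_adjLE, intToList, adjLE_map_digit, isNonDecreasing]
  exact (adjLE_zip (PySem.Int.toChars num)).symm

-- A's loop value, as a function of the upper bound
def loopA (n : Int) : Int :=
  (PySem.List.pyRange 1 (n + 1) 1).foldl (fun cur i => if isTiny i then i else cur) (-1)

lemma loopA_step (n : Int) (h : 1 ≤ n) :
    loopA n = if isTiny n then n else loopA (n - 1) := by
  unfold loopA
  rw [show n + 1 = (n - 1) + 1 + 1 by ring, PySem.List.pyRange_one_succ_right (by omega),
    List.foldl_append]
  simp

lemma loopA_nine : loopA 9 = 9 := by decide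

lemma loopA_eq_countDown : ∀ (k : Nat) (n : Int), n = 9 + k → loopA n = countDown k n := by
  intro k
  induction k with
  | zero => intro n hn; subst hn; exact loopA_nine
  | succ m ih =>
      intro n hn
      rw [countDown, loopA_step n (by omega), tiny_agree]
      split_ifs with h
      · rfl
      · exact ih (n - 1) (by omega)

-- ===== VERDICT (by name: the statement is the Claim_ definition above) =====
theorem getLastTinyNumb_spec : Claim_equal_getLastTinyNumb := by
  intro maxNum _
  show getLastTinyNumb maxNum = getLastTinyNumb_alt maxNum
  unfold getLastTinyNumb getLastTinyNumb_alt
  split_ifs with h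
  · rfl
  · exact loopA_eq_countDown (maxNum - 9).toNat maxNum (by omega)
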